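-- pv_equiv track=rewrite | github.com/hyunolike/coding-test | programmers_1/리뷰_모의고사.py | solution
-- ===== SOURCE A (Python) =====
-- def solution(answers):
--     answer = []
--     # 12345 : 4
--     # 21 23 24 25 : 7
--     # 33 11 22 44 55 : 9
--     one=[1,2,3,4,5]
--     two=[2,1,2,3,2,4,2,5]
--     three=[3,3,1,1,2,2,4,4,5,5]
--     cnt=[0,0,0]
--
--     for i in range(len(answers)):
--         if answers[i]==one[i%len(one)]: cnt[0]+=1
--         if answers[i]==two[i%len(two)]: cnt[1]+=1
--         if answers[i]==three[i%len(three)]: cnt[2]+=1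
--
--     for idx, c in enumerate(cnt, 1):
--         if max(cnt)==c:
--             answer.append(idx)
--
--     return answer
-- ===== SOURCE B (Python) =====
-- def solution(answers):
--     one = [1, 2, 3, 4, 5]
--     two = [2, 1, 2, 3, 2, 4, 2, 5]
--     three = [3, 3, 1, 1, 2, 2, 4, 4, 5, 5]
--     # All three patterns repeat with period 40 = lcm(5, 8, 10): histogram the
--     # answers by (position mod 40, value) in one pass, then score each
--     # supervisor from the 40-slot histogram instead of comparing every answer
--     # against each pattern.
--     freq = {}
--     for i, a in enumerate(answers):
--         key = (i % 40, a)
--         freq[key] = freq.get(key, 0) + 1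
--     counts = [sum(freq.get((r, p[r % len(p)]), 0) for r in range(40))
--               for p in (one, two, three)]
--     m = max(counts)
--     return [j + 1 for j, c in enumerate(counts) if c == m]
-- ===== Notes on version B (the rewrite author's own statement) =====
-- stated objective: alternative
-- what changed: Replaces A's per-element comparison against all three patterns (one interleaved loop with three ifs on a mutable cnt triple) by a histogram algorithm: one pass builds a dict keyed by (index mod 40, answer) -- 40 = lcm of the pattern periods -- and each supervisor's score is then read off as a 40-term sum over the histogram, so no answer is ever compared to a pattern.
import Mathlib
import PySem

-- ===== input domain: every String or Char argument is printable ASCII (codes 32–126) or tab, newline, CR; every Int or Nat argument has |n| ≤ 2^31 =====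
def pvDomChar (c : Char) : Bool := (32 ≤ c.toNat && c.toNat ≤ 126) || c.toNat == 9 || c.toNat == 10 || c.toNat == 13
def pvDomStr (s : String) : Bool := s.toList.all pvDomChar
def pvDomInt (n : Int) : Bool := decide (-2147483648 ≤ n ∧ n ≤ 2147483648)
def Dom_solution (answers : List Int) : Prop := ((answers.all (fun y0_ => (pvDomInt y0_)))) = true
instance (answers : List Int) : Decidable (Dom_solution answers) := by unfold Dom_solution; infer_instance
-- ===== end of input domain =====

-- B replaces A's interleaved per-element comparison loop by a histogram keyed by
-- (index mod 40, answer) — 40 = lcm of the pattern periods — from which each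
-- supervisor's score is read off as a 40-term sum (alternative algorithm; same cost).


-- ===== PORT A =====
-- one interleaved loop over indices, updating the triple cnt; answers[i] / one[i%5] via pyGetD
-- (always in range here, so the total form is exact).
def solutionLoopBody (answers : List Int) (c : Int × Int × Int) (i : Int) : Int × Int × Int :=
  let c0 := c.1 + (if PySem.List.pyGetD answers i 0
      = PySem.List.pyGetD ([1,2,3,4,5] : List Int) (PySem.Int.mod i 5) 0 then 1 else 0)
  let c1 := c.2.1 + (if PySem.List.pyGetD answers i 0
      = PySem.List.pyGetD ([2,1,2,3,2,4,2,5] : List Int) (PySem.Int.mod i 8) 0 then 1 else 0)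
  let c2 := c.2.2 + (if PySem.List.pyGetD answers i 0
      = PySem.List.pyGetD ([3,3,1,1,2,2,4,4,5,5] : List Int) (PySem.Int.mod i 10) 0 then 1 else 0)
  (c0, c1, c2)

def solution (answers : List Int) : List Int :=
  let cnt := (PySem.List.pyRange 0 (answers.length : Int)).foldl (solutionLoopBody answers) (0, 0, 0)
  let cntList : List Int := [cnt.1, cnt.2.1, cnt.2.2]
  (PySem.List.enumerate cntList 1).foldl
    (fun ans p => if (PySem.List.max? cntList id).getD 0 = p.2 then ans ++ [p.1] else ans) []

-- ===== PORT B =====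
-- freq[key] = freq.get(key, 0) + 1 with key = (i % 40, a)
def histStep (d : PySem.Dict (Int × Int) Int) (ia : Int × Int) : PySem.Dict (Int × Int) Int :=
  d.insert (PySem.Int.mod ia.1 40, ia.2) (d.getD (PySem.Int.mod ia.1 40, ia.2) 0 + 1)

-- sum(freq.get((r, p[r % len(p)]), 0) for r in range(40))
def patCount (freq : PySem.Dict (Int × Int) Int) (p : List Int) : Int :=
  ((PySem.List.pyRange 0 40).map
    (fun r => freq.getD (r, PySem.List.pyGetD p (PySem.Int.mod r (p.length : Int)) 0) 0)).sum

def solution_alt (answers : List Int) : List Int :=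
  let freq := (PySem.List.enumerate answers).foldl histStep PySem.Dict.empty
  let counts := ([[1,2,3,4,5], [2,1,2,3,2,4,2,5], [3,3,1,1,2,2,4,4,5,5]] : List (List Int)).map
    (fun p => patCount freq p)
  let m := (PySem.List.max? counts id).getD 0
  ((PySem.List.enumerate counts).filter (fun jc => jc.2 = m)).map (fun jc => jc.1 + 1)

-- ===== PRECONDITION & SPEC =====
def Spec_solution (answers : List Int) (out : List Int) : Prop := out = solution_alt answers
instance (answers : List Int) (out : List Int) : Decidable (Spec_solution answers out) := by unfold Spec_solution; infer_instance

-- ===== CLAIM =====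
def Claim_equal_solution : Prop := ∀ (answers : List Int), Dom_solution answers → Spec_solution answers (solution answers)

-- ===== LEMMAS AND PROOFS =====

-- the number of matches pattern p scores on suffix ys whose first element sits at index k
def patScoreFrom (p : List Int) (ys : List Int) (k : Int) : Int :=
  ((PySem.List.enumerate ys k).map
    (fun ia => if ia.2 = PySem.List.pyGetD p (PySem.Int.mod ia.1 (p.length : Int)) 0 then (1 : Int) else 0)).sum

lemma patScoreFrom_cons (p : List Int) (a : Int) (ys : List Int) (k : Int) :
    patScoreFrom p (a :: ys) k
      = (if a = PySem.List.pyGetD p (PySem.Int.mod k (p.length : Int)) 0 then (1 : Int) else 0)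
        + patScoreFrom p ys (k + 1) := by
  simp [patScoreFrom, PySem.List.enumerate]

-- A's interleaved loop over indices k..len-1 equals the three per-pattern scores on the suffix
set_option maxRecDepth 4096 in
lemma loopA_eq (answers : List Int) :
    ∀ (ys : List Int) (k : Nat), answers.drop k = ys → ∀ (c0 c1 c2 : Int),
    (PySem.List.pyRange (k : Int) (answers.length : Int)).foldl
        (solutionLoopBody answers) (c0, c1, c2)
      = (c0 + patScoreFrom [1,2,3,4,5] ys (k : Int),
         c1 + patScoreFrom [2,1,2,3,2,4,2,5] ys (k : Int),
         c2 + patScoreFrom [3,3,1,1,2,2,4,4,5,5] ys (k : Int)) := by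
  intro ys
  induction ys with
  | nil =>
    intro k hk c0 c1 c2
    have hlen : answers.length ≤ k := by
      have := congrArg List.length hk; simp at this; omega
    have : PySem.List.pyRange (k : Int) (answers.length : Int) = [] := by
      simp [PySem.List.pyRange]; omega
    simp [this, patScoreFrom, PySem.List.enumerate]
  | cons a ys ih =>
    intro k hk c0 c1 c2
    have hklt : k < answers.length := by
      by_contra h
      have : answers.drop k = [] := List.drop_eq_nil_of_le (by omega)
      simp [this] at hk
    have hget : answers[k]? = some a := by
      have := congrArg List.head? hk
      simpa [List.head?_drop] using this
    have hgetD : PySem.List.pyGetD answers (k : Int) 0 = a := by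
      simp [PySem.List.pyGetD_natCast, List.getD, hget]
    have hdrop : answers.drop (k + 1) = ys := by
      have := congrArg List.tail hk
      simpa [List.tail_drop] using this
    rw [PySem.List.pyRange_one_cons (by exact_mod_cast hklt)]
    simp only [List.foldl_cons]
    have hk1 : ((k : Int) + 1) = ((k + 1 : Nat) : Int) := by push_cast; ring
    rw [show solutionLoopBody answers (c0, c1, c2) (k : Int)
        = (c0 + (if a = PySem.List.pyGetD ([1,2,3,4,5] : List Int) (PySem.Int.mod (k : Int) 5) 0 then 1 else 0),
           c1 + (if a = PySem.List.pyGetD ([2,1,2,3,2,4,2,5] : List Int) (PySem.Int.mod (k : Int) 8) 0 then 1 else 0),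
           c2 + (if a = PySem.List.pyGetD ([3,3,1,1,2,2,4,4,5,5] : List Int) (PySem.Int.mod (k : Int) 10) 0 then 1 else 0))
      from by simp only [solutionLoopBody, hgetD]]
    rw [hk1, ih (k + 1) hdrop]
    simp [patScoreFrom_cons]
    refine ⟨by ring, by ring, by ring⟩

-- inserting at a key whose first component is not listed leaves the histogram sum unchanged
lemma sum_getD_insert_notmem (f : Int → Int) (key : Int × Int) (v : Int) :
    ∀ (rs : List Int) (d : PySem.Dict (Int × Int) Int), key.1 ∉ rs →
    ((rs.map (fun r => (d.insert key v).getD (r, f r) 0)).sum)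
      = (rs.map (fun r => d.getD (r, f r) 0)).sum := by
  intro rs
  induction rs with
  | nil => intro d _; simp
  | cons r t ih =>
    intro d h
    have hr : (r, f r) ≠ key := by
      intro he; apply h; rw [← he]; exact List.mem_cons_self
    rw [List.map_cons, List.map_cons, List.sum_cons, List.sum_cons,
        ih d (fun hm => h (List.mem_cons_of_mem _ hm)),
        PySem.Dict.getD_insert, if_neg hr]

-- one histogram insertion adds exactly the match indicator to the histogram sum
lemma sum_getD_insert_add (f : Int → Int) (key : Int × Int) :
    ∀ (rs : List Int) (d : PySem.Dict (Int × Int) Int), rs.Nodup →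
    ((rs.map (fun r => (d.insert key (d.getD key 0 + 1)).getD (r, f r) 0)).sum)
      = (rs.map (fun r => d.getD (r, f r) 0)).sum
        + (if key.1 ∈ rs ∧ key.2 = f key.1 then 1 else 0) := by
  intro rs
  induction rs with
  | nil => intro d _; simp
  | cons r t ih =>
    intro d hnd
    have hnd' := hnd
    rw [List.nodup_cons] at hnd'
    by_cases hr : r = key.1
    · subst hr
      rw [List.map_cons, List.map_cons, List.sum_cons, List.sum_cons,
          sum_getD_insert_notmem f key (d.getD key 0 + 1) t d hnd'.1]
      by_cases hv : key.2 = f key.1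
      · have hk : (key.1, f key.1) = key := by
          obtain ⟨k1, k2⟩ := key; simp only at hv ⊢; rw [← hv]
        rw [PySem.Dict.getD_insert, if_pos hk, hk,
            if_pos (And.intro List.mem_cons_self hv)]
        ring
      · have hk : (key.1, f key.1) ≠ key := by
          intro he; apply hv
          have h2 := congrArg Prod.snd he; exact h2.symm
        rw [PySem.Dict.getD_insert, if_neg hk,
            if_neg (fun hc => hv hc.2)]
        ring
    · have hmem : (key.1 ∈ r :: t ∧ key.2 = f key.1) ↔ (key.1 ∈ t ∧ key.2 = f key.1) := by
        constructor
        · rintro ⟨h1, h2⟩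
          rcases List.mem_cons.mp h1 with h | h
          · exact absurd h.symm hr
          · exact ⟨h, h2⟩
        · rintro ⟨h1, h2⟩; exact ⟨List.mem_cons_of_mem _ h1, h2⟩
      have hk : (r, f r) ≠ key := by
        intro he; apply hr; rw [← he]
      rw [List.map_cons, List.map_cons, List.sum_cons, List.sum_cons,
          ih d hnd'.2, PySem.Dict.getD_insert, if_neg hk,
          if_congr hmem rfl rfl]
      ring

-- the histogram fold, read through patCount, accumulates the pattern's score
lemma fold_patCount (p : List Int)
    (hmod : ∀ i : Int, PySem.Int.mod (PySem.Int.mod i 40) (p.length : Int)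
        = PySem.Int.mod i (p.length : Int)) :
    ∀ (ys : List Int) (k : Int) (d : PySem.Dict (Int × Int) Int),
    patCount ((PySem.List.enumerate ys k).foldl histStep d) p
      = patCount d p + patScoreFrom p ys k := by
  intro ys
  induction ys with
  | nil => intro k d; simp [patScoreFrom, PySem.List.enumerate]
  | cons a ys ih =>
    intro k d
    rw [PySem.List.enumerate_cons, List.foldl_cons, ih, patScoreFrom_cons]
    have hkey : patCount (histStep d (k, a)) p
        = patCount d p
          + (if a = PySem.List.pyGetD p (PySem.Int.mod k (p.length : Int)) 0 then 1 else 0) := by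
      unfold patCount histStep
      have h := sum_getD_insert_add
        (fun r => PySem.List.pyGetD p (PySem.Int.mod r (p.length : Int)) 0)
        (PySem.Int.mod k 40, a) (PySem.List.pyRange 0 40) d
        (by rw [show (40 : Int) = ((40 : Nat) : Int) by norm_num]
            exact PySem.List.nodup_pyRange_one 0 40)
      rw [h]
      congr 1
      have hmem : PySem.Int.mod k 40 ∈ PySem.List.pyRange (0 : Int) 40 := by
        rw [PySem.List.mem_pyRange_one]
        exact ⟨PySem.Int.mod_nonneg k (by norm_num), PySem.Int.mod_lt k (by norm_num)⟩
      simp only [hmem, true_and, hmod k]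
    rw [hkey]; ring

-- the empty dict scores 0
lemma patCount_empty (p : List Int) : patCount PySem.Dict.empty p = 0 := by
  unfold patCount
  rw [show (fun r => (PySem.Dict.empty : PySem.Dict (Int × Int) Int).getD
        (r, PySem.List.pyGetD p (PySem.Int.mod r (p.length : Int)) 0) 0) = (fun _ : Int => (0 : Int))
    from by funext r; simp [PySem.Dict.getD, PySem.Dict.get?, PySem.Dict.empty]]
  simp

-- period lemmas: 40 is a multiple of each pattern length
lemma mod40_mod (L : Int) (hL : 0 < L) (hdvd : L ∣ 40) (i : Int) :
    PySem.Int.mod (PySem.Int.mod i 40) L = PySem.Int.mod i L := by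
  rw [PySem.Int.mod_eq_emod_of_pos (by norm_num : (0:Int) < 40),
      PySem.Int.mod_eq_emod_of_pos hL, PySem.Int.mod_eq_emod_of_pos hL]
  exact Int.emod_emod_of_dvd i hdvd

theorem solution_spec_aux (answers : List Int) :
    solution answers = solution_alt answers := by
  have h := loopA_eq answers answers 0 (by simp) 0 0 0
  simp only [Nat.cast_zero, zero_add] at h
  unfold solution solution_alt
  rw [h]
  have hB : ∀ p : List Int,
      (∀ i : Int, PySem.Int.mod (PySem.Int.mod i 40) (p.length : Int)
        = PySem.Int.mod i (p.length : Int)) →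
      patCount ((PySem.List.enumerate answers).foldl histStep PySem.Dict.empty) p
        = patScoreFrom p answers 0 := by
    intro p hmod
    rw [fold_patCount p hmod answers 0 PySem.Dict.empty, patCount_empty, zero_add]
  simp only [List.map_cons, List.map_nil,
      hB [1,2,3,4,5] (mod40_mod 5 (by norm_num) (by norm_num)),
      hB [2,1,2,3,2,4,2,5] (mod40_mod 8 (by norm_num) (by norm_num)),
      hB [3,3,1,1,2,2,4,4,5,5] (mod40_mod 10 (by norm_num) (by norm_num))]
  set s0 := patScoreFrom [1,2,3,4,5] answers 0
  set s1 := patScoreFrom [2,1,2,3,2,4,2,5] answers 0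
  set s2 := patScoreFrom [3,3,1,1,2,2,4,4,5,5] answers 0
  generalize (PySem.List.max? [s0, s1, s2] id).getD 0 = m
  rw [show (fun jc : Int × Int => decide (jc.2 = m)) = (fun jc => decide (m = jc.2)) by
    funext jc; simp [eq_comm]]
  simp only [PySem.List.enumerate, List.foldl, List.filter]
  split_ifs <;> simp_all

-- ===== VERDICT =====
theorem solution_spec : Claim_equal_solution := by
  intro answers _
  unfold Spec_solution
  exact solution_spec_aux answers
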